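-- pv_equiv track=rewrite | github.com/sudpaul/Research_Intelligence | scopus_api_retrive/researchers_theme.py | check_theme
-- ===== SOURCE A (Python) =====
-- from collections import defaultdict
--
-- def check_theme(subjects):
--
--     """The function input is SCOPUS author subjects area and it maps to medicine
--     theme ASJC codes. Return the theme_subjects and map to aggregate theme result.
--
--     Parameters
--     ----------
--     subjects : dict
--                Subject categories of Scopus author Subject areas
--     Returns
--     ----------
--     theme_subjects : dict
--                      Mapping of the ASJC codes of SCOPUS subjects to theme_subjects
--
--     result : dict
--              aggregate result of the theme mapping
--     """
--
--
--     result = defaultdict(int)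
--
--     data_set = {'Cancer Research','Oncology', 'Cancer', 'Radiation',
--                 'Oncology(nursing)', 'Endocrinology',
--                 'General Immunology and Microbiology',
--                 'Immunology and Microbiology (miscellaneous)',
--             'Immunology', 'Microbiology','Immunology and Allergy',
--             'Microbiology (medical)', 'Parasitology', 'Virology', 'Dermatology',
--             'Allergy', 'Infectious Diseases', 'Rheumatology', 'Toxicology',
--             'Clinical Neurology','Psychiatry and Mental Health','General Neuroscience',
--             'Neuroscience (miscellaneous)' , 'Behavioral Neuroscience',
--             'Biological Psychiatry','Cellular and Molecular Neuroscience',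
--             'Cognitive Neuroscience',
--             'Developmental Neuroscience', 'Neurology' ,'Psychiatry Mental Health',
--             'Psychology (miscellaneous)',
--             'Experimental and Cognitive Psychology',
--             'Neuropsychology and Physiological Psychology',
--             'Cardiology', 'Cardiovascular Medicine','Cardiology and Cardiovascular Medicine',
--             'Critical Care and Intensive Care Medicine',
--             'Emergency Medicine','Endocrinology, Diabetes and Metabolism',
--             'Pulmonary and Respiratory Medicine','Epidemiology','Family Practice',
--             'Gastroenterology','Health Informatics','Health Policy','Hematology','Hepatology',
--             'Internal Medicine','Nephrology', 'Ophthalmology', 'Orthopedics and Sports Medicine',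
--             'Otorhinolaryngology', 'Transplantation','Urology', 'Critical Care','Respiratory Care'}
--
--
--
--     theme_dict = {'Cancer' : {'Cancer Research','Oncology', 'Cancer', 'Radiation',
--                               'Oncology(nursing)'} ,
--                   'Triple I' : {'Endocrinology','General Immunology and Microbiology',
--                                 'Immunology and Microbiology (miscellaneous)',
--                                 'Immunology', 'Microbiology','Immunology and Allergy',
--                                 'Microbiology (medical)','Parasitology', 'Virology',
--                                 'Dermatology', 'Allergy', 'Infectious Diseases',
--                                 'Rheumatology', 'Toxicology'},
--                    'NMHA' : {'Clinical Neurology','Psychiatry and Mental Health',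
--                              'General Neuroscience','Neuroscience (miscellaneous)' ,
--                              'Behavioral Neuroscience', 'Biological Psychiatry',
--                              'Cellular and Molecular Neuroscience','Cognitive Neuroscience',
--                              'Developmental Neuroscience', 'Neurology' ,'Psychiatry Mental Health',
--                              'Psychology (miscellaneous)', 'Experimental and Cognitive Psychology',
--                              'Neuropsychology and Physiological Psychology'},
--
--                    'NCD' : {'Cardiology', 'Cardiovascular Medicine','Cardiology and Cardiovascular Medicine',
--                             'Critical Care and Intensive Care Medicine', 'Emergency Medicine',
--                             'Endocrinology, Diabetes and Metabolism', 'Pulmonary and Respiratory Medicine',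
--                             'Epidemiology','Family Practice', 'Gastroenterology',
--                             'Health Informatics','Health Policy','Hematology','Hepatology',
--                             'Internal Medicine','Nephrology', 'Ophthalmology',
--                             'Orthopedics and Sports Medicine', 'Otorhinolaryngology',
--                             'Transplantation','Urology', 'Critical Care','Respiratory Care'}}
--
--     #Filter the author publication subjects ASJC codes to UNSW med theme ASJC listed codes
--     theme_subjects = {key:value for key, value in subjects.items() if key in data_set}
--     #If ASJC codes are matched then mapped to the data dictionary of theme Subjects
--     if theme_subjects:
--         for theme, match in theme_dict.items():
--             for subject in theme_subjects:
--                if subject in match: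
--                   result[theme] += theme_subjects[subject]
--         return theme_subjects, dict(result)
--     else:
--         return subjects, None
-- ===== SOURCE B (Python) =====
-- THEME_DICT = {'Cancer' : {'Cancer Research','Oncology', 'Cancer', 'Radiation',
--                           'Oncology(nursing)'} ,
--               'Triple I' : {'Endocrinology','General Immunology and Microbiology',
--                             'Immunology and Microbiology (miscellaneous)',
--                             'Immunology', 'Microbiology','Immunology and Allergy',
--                             'Microbiology (medical)','Parasitology', 'Virology',
--                             'Dermatology', 'Allergy', 'Infectious Diseases',
--                             'Rheumatology', 'Toxicology'},
--               'NMHA' : {'Clinical Neurology','Psychiatry and Mental Health',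
--                         'General Neuroscience','Neuroscience (miscellaneous)' ,
--                         'Behavioral Neuroscience', 'Biological Psychiatry',
--                         'Cellular and Molecular Neuroscience','Cognitive Neuroscience',
--                         'Developmental Neuroscience', 'Neurology' ,'Psychiatry Mental Health',
--                         'Psychology (miscellaneous)', 'Experimental and Cognitive Psychology',
--                         'Neuropsychology and Physiological Psychology'},
--               'NCD' : {'Cardiology', 'Cardiovascular Medicine','Cardiology and Cardiovascular Medicine',
--                        'Critical Care and Intensive Care Medicine', 'Emergency Medicine',
--                        'Endocrinology, Diabetes and Metabolism', 'Pulmonary and Respiratory Medicine',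
--                        'Epidemiology','Family Practice', 'Gastroenterology',
--                        'Health Informatics','Health Policy','Hematology','Hepatology',
--                        'Internal Medicine','Nephrology', 'Ophthalmology',
--                        'Orthopedics and Sports Medicine', 'Otorhinolaryngology',
--                        'Transplantation','Urology', 'Critical Care','Respiratory Care'}}
--
-- # Inverted index: subject -> its (unique) theme.  The themes partition data_set.
-- LOOKUP = {subject: theme for theme, subs in THEME_DICT.items() for subject in subs}
--
-- def check_theme(subjects):
--     theme_subjects = {k: v for k, v in subjects.items() if k in LOOKUP}
--     if not theme_subjects:
--         return subjects, None
--     counts = {}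
--     for k, v in theme_subjects.items():
--         t = LOOKUP[k]
--         counts[t] = counts.get(t, 0) + v
--     # deterministic theme order, as listed in THEME_DICT
--     return theme_subjects, {t: counts[t] for t in THEME_DICT if t in counts}
-- ===== Notes on version B (the rewrite author's own statement) =====
-- stated objective: idiomatic
-- what changed: A's nested theme-by-subject accumulation (4 themes x all filtered subjects, with a per-subject dict lookup) is replaced by a one-pass tally through an inverted subject-to-theme index built once, followed by a projection of the tally into the fixed theme order.
import Mathlib
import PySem

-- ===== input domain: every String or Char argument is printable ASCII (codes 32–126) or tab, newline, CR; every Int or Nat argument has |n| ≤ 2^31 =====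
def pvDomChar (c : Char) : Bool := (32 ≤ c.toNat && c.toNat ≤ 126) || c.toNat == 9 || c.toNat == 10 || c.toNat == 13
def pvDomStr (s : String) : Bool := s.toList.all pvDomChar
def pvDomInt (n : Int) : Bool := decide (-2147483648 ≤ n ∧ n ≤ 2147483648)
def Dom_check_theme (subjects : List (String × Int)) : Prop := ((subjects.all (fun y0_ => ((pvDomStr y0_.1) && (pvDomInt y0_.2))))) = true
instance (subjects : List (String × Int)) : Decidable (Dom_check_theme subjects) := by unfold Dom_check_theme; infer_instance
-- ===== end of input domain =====

-- B replaces A's nested theme×subject accumulation loop by a single pass over the filtered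
-- subjects through an inverted subject→theme index (objective: idiomatic/alternative, not faster).

-- ===== PORT A =====
-- Shared data literal (identical in Source A and Source B): the theme → subject-set table, in source order.
def pvDataSetList : List String :=
  ["Cancer Research", "Oncology", "Cancer", "Radiation", "Oncology(nursing)", "Endocrinology", "General Immunology and Microbiology", "Immunology and Microbiology (miscellaneous)", "Immunology", "Microbiology", "Immunology and Allergy", "Microbiology (medical)", "Parasitology", "Virology", "Dermatology", "Allergy", "Infectious Diseases", "Rheumatology", "Toxicology", "Clinical Neurology", "Psychiatry and Mental Health", "General Neuroscience", "Neuroscience (miscellaneous)", "Behavioral Neuroscience", "Biological Psychiatry", "Cellular and Molecular Neuroscience", "Cognitive Neuroscience", "Developmental Neuroscience", "Neurology", "Psychiatry Mental Health", "Psychology (miscellaneous)", "Experimental and Cognitive Psychology", "Neuropsychology and Physiological Psychology", "Cardiology", "Cardiovascular Medicine", "Cardiology and Cardiovascular Medicine", "Critical Care and Intensive Care Medicine", "Emergency Medicine", "Endocrinology, Diabetes and Metabolism", "Pulmonary and Respiratory Medicine", "Epidemiology", "Family Practice", "Gastroenterology", "Health Informatics", "Health Policy", "Hematology", "Hepatology",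 "Internal Medicine", "Nephrology", "Ophthalmology", "Orthopedics and Sports Medicine", "Otorhinolaryngology", "Transplantation", "Urology", "Critical Care", "Respiratory Care"]

def pvThemeDict : List (String × PySem.Set String) :=
  [("Cancer", PySem.Set.ofList ["Cancer Research", "Oncology", "Cancer", "Radiation", "Oncology(nursing)"]),
   ("Triple I", PySem.Set.ofList ["Endocrinology", "General Immunology and Microbiology", "Immunology and Microbiology (miscellaneous)", "Immunology", "Microbiology", "Immunology and Allergy", "Microbiology (medical)", "Parasitology", "Virology", "Dermatology", "Allergy", "Infectious Diseases", "Rheumatology", "Toxicology"]),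
   ("NMHA", PySem.Set.ofList ["Clinical Neurology", "Psychiatry and Mental Health", "General Neuroscience", "Neuroscience (miscellaneous)", "Behavioral Neuroscience", "Biological Psychiatry", "Cellular and Molecular Neuroscience", "Cognitive Neuroscience", "Developmental Neuroscience", "Neurology", "Psychiatry Mental Health", "Psychology (miscellaneous)", "Experimental and Cognitive Psychology", "Neuropsychology and Physiological Psychology"]),
   ("NCD", PySem.Set.ofList ["Cardiology", "Cardiovascular Medicine", "Cardiology and Cardiovascular Medicine", "Critical Care and Intensive Care Medicine", "Emergency Medicine", "Endocrinology, Diabetes and Metabolism", "Pulmonary and Respiratory Medicine", "Epidemiology", "Family Practice", "Gastroenterology", "Health Informatics", "Health Policy", "Hematology", "Hepatology", "Internal Medicine", "Nephrology", "Ophthalmology", "Orthopedics and Sports Medicine", "Otorhinolaryngology", "Transplantation", "Urology", "Critical Care", "Respiratory Care"])]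

-- A's data_set (used only for membership tests; Python set iteration order is never consumed).
def pvDataSet : PySem.Set String := PySem.Set.ofList pvDataSetList

def check_theme (subjects : List (String × Int)) : (List (String × Int)) × (Option (List (String × Int))) :=
  -- theme_subjects = {key:value for key, value in subjects.items() if key in data_set}
  let theme_subjects := subjects.filter (fun kv => PySem.Set.contains pvDataSet kv.1)
  if !theme_subjects.isEmpty then
    -- result = defaultdict(int); for theme, match in theme_dict.items(): for subject in theme_subjects:
    --   if subject in match: result[theme] += theme_subjects[subject]
    -- (theme_subjects[subject] ported as getD: the key is present, so Python's [] never raises here)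
    let result := pvThemeDict.foldl (fun result tm =>
      theme_subjects.foldl (fun result kv =>
        if PySem.Set.contains tm.2 kv.1 then
          PySem.Dict.modify result tm.1 0
            (· + PySem.Dict.getD (PySem.Dict.ofList theme_subjects) kv.1 0)
        else result) result) PySem.Dict.empty
    (theme_subjects, some result.items)
  else
    (subjects, none)

-- ===== PORT B =====
-- LOOKUP = {subject: theme for theme, subs in THEME_DICT.items() for subject in subs}
def pvLookup : PySem.Dict String String :=
  PySem.Dict.ofList (pvThemeDict.flatMap (fun tm => tm.2.map (fun s => (s, tm.1))))

def check_theme_alt (subjects : List (String × Int)) : (List (String × Int)) × (Option (List (String × Int))) :=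
  let theme_subjects := subjects.filter (fun kv => PySem.Dict.contains pvLookup kv.1)
  if theme_subjects.isEmpty then
    (subjects, none)
  else
    -- counts = {}; for k, v in theme_subjects.items(): t = LOOKUP[k]; counts[t] = counts.get(t, 0) + v
    -- (LOOKUP[k] ported as getD: the filter guarantees the key is present, so Python's [] never raises)
    let counts := theme_subjects.foldl (fun c kv =>
      let t := PySem.Dict.getD pvLookup kv.1 ""
      PySem.Dict.insert c t (PySem.Dict.getD c t 0 + kv.2)) PySem.Dict.empty
    -- {t: counts[t] for t in THEME_DICT if t in counts}
    let result := (pvThemeDict.map Prod.fst).filterMap (fun t =>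
      if PySem.Dict.contains counts t then some (t, PySem.Dict.getD counts t 0) else none)
    (theme_subjects, some result)

-- ===== PRECONDITION & SPEC =====
-- Pre_ excludes association lists with duplicate keys: A's parameter is a Python dict, whose
-- key sequence is duplicate-free, so such lists do not represent any actual input of A.
def Pre_check_theme (subjects : List (String × Int)) : Prop := (subjects.map Prod.fst).Nodup
instance (subjects : List (String × Int)) : Decidable (Pre_check_theme subjects) := by unfold Pre_check_theme; infer_instance
def pvWitness_check_theme : (List (String × Int)) := [("Oncology", 2), ("Virology", 3), ("unmapped subject", 1)]

def Spec_check_theme (subjects : List (String × Int)) (out : (List (String × Int)) × (Option (List (String × Int)))) : Prop := out = check_theme_alt subjects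
instance (subjects : List (String × Int)) (out : (List (String × Int)) × (Option (List (String × Int)))) : Decidable (Spec_check_theme subjects out) := by unfold Spec_check_theme; infer_instance

-- ===== CLAIM (what is proved, stated in full; the proofs are below) =====
def Claim_equal_check_theme : Prop := ∀ (subjects : List (String × Int)), Dom_check_theme subjects → Pre_check_theme subjects → Spec_check_theme subjects (check_theme subjects)

-- ===== LEMMAS AND PROOFS =====
set_option maxRecDepth 100000

-- The flat (subject, theme) pair list behind pvLookup, for decidable data facts.
def pvFlat : List (String × String) := pvThemeDict.flatMap (fun tm => tm.2.map (fun s => (s, tm.1)))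

theorem pv_items_lookup : pvLookup.items = pvFlat := by decide

theorem pv_keys_flat : pvFlat.map Prod.fst = pvDataSetList := by decide

theorem pv_nodup : pvDataSetList.Nodup := by decide

theorem pv_keys_lookup : pvLookup.keys = pvDataSetList := by
  show pvLookup.items.map Prod.fst = pvDataSetList
  rw [pv_items_lookup, pv_keys_flat]

-- every membership test agrees between A's data_set and B's LOOKUP
theorem pv_contains_eq : ∀ k : String, PySem.Set.contains pvDataSet k = PySem.Dict.contains pvLookup k := by
  intro k
  rw [Bool.eq_iff_iff, PySem.Set.contains_iff, PySem.Dict.contains_iff_mem_keys, pv_keys_lookup]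
  simp [pvDataSet, PySem.Set.mem_ofList]

-- the themes partition data_set: subject k belongs to theme set tm.2 iff LOOKUP maps k to tm.1
theorem pv_partition : ∀ kv ∈ pvFlat, ∀ tm ∈ pvThemeDict,
    PySem.Set.contains tm.2 kv.1 = (kv.2 == tm.1) := by decide

theorem pv_getD_lookup : ∀ k ∈ pvDataSetList,
    ∀ tm ∈ pvThemeDict, PySem.Set.contains tm.2 k = (PySem.Dict.getD pvLookup k "" == tm.1) := by
  intro k hk tm htm
  obtain ⟨kv, hkv, hfst⟩ : ∃ kv ∈ pvFlat, kv.1 = k := by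
    rw [← pv_keys_flat] at hk
    obtain ⟨kv, hkv, h⟩ := List.mem_map.mp hk
    exact ⟨kv, hkv, h⟩
  have hnk : pvLookup.keys.Nodup := by rw [pv_keys_lookup]; exact pv_nodup
  have hmem : (kv.1, kv.2) ∈ pvLookup.items := by rw [pv_items_lookup]; simpa using hkv
  have hg : PySem.Dict.getD pvLookup kv.1 "" = kv.2 :=
    PySem.Dict.getD_of_mem_items pvLookup hmem hnk ""
  rw [← hfst, hg]
  exact pv_partition kv hkv tm htm

-- A's defaultdict increment, twice at the same key, collapses
theorem pv_modify_modify (r : PySem.Dict String Int) (t : String) (a b : Int) :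
    (r.modify t 0 (· + a)).modify t 0 (· + b) = r.modify t 0 (· + (a + b)) := by
  simp [PySem.Dict.modify, PySem.Dict.getD_insert_self, PySem.Dict.insert_insert_self, add_assoc]

-- A's inner loop over one theme, in closed form
theorem pv_inner_loop {α : Type} (p : α → Bool) (g : α → Int) (t : String) :
    ∀ (l : List α) (r : PySem.Dict String Int),
      l.foldl (fun r x => if p x then r.modify t 0 (· + g x) else r) r
      = if l.any p then r.modify t 0 (· + ((l.filter p).map g).sum) else r := by
  intro l
  induction l with
  | nil => intro r; simp
  | cons x xs ih =>
    intro r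
    by_cases hp : p x
    · rw [List.foldl_cons, if_pos hp, ih]
      by_cases ha : xs.any p
      · simp [hp, ha, pv_modify_modify]
      · have ha' : xs.any p = false := by simpa using ha
        have hf : xs.filter p = [] := by
          rw [List.filter_eq_nil_iff]
          intro a hm
          simpa using List.any_eq_false.mp ha' a hm
        simp [hp, ha', hf]
    · rw [List.foldl_cons, if_neg hp, ih]
      simp [hp]

theorem pv_fresh_items (r : PySem.Dict String Int) (t : String) (S : Int)
    (h : r.contains t = false) :
    (r.modify t 0 (· + S)).items = r.items ++ [(t, S)] := by
  simp [PySem.Dict.modify, PySem.Dict.getD_of_not_contains r 0 h, PySem.Dict.items_insert_of_not_contains r _ h]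

-- B's counting loop: value at t
theorem pv_counts_getD {α : Type} (key : α → String) (val : α → Int) (t : String) :
    ∀ (l : List α) (c : PySem.Dict String Int),
      (l.foldl (fun c x => PySem.Dict.insert c (key x) (PySem.Dict.getD c (key x) 0 + val x)) c).getD t 0
      = c.getD t 0 + ((l.filter (fun x => key x == t)).map val).sum := by
  intro l
  induction l with
  | nil => intro c; simp
  | cons x xs ih =>
    intro c
    rw [List.foldl_cons, ih]
    by_cases he : key x = t
    · simp [he, add_assoc]
    · simp [he, PySem.Dict.getD_insert, Ne.symm he]

-- B's counting loop: key presence at t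
theorem pv_counts_contains {α : Type} (key : α → String) (val : α → Int) (t : String) :
    ∀ (l : List α) (c : PySem.Dict String Int),
      (l.foldl (fun c x => PySem.Dict.insert c (key x) (PySem.Dict.getD c (key x) 0 + val x)) c).contains t
      = (c.contains t || l.any (fun x => key x == t)) := by
  intro l
  induction l with
  | nil => intro c; simp
  | cons x xs ih =>
    intro c
    rw [List.foldl_cons, ih]
    by_cases he : key x = t
    · simp [he]
    · have h1 : (t == key x) = false := by simp [beq_eq_false_iff_ne, Ne.symm he]
      have h2 : (key x == t) = false := by simp [beq_eq_false_iff_ne, he]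
      simp [PySem.Dict.contains_insert, h1, h2]

-- the matching condition and per-theme total over the filtered subject list, via B's index
def pvA (ts : List (String × Int)) (t : String) : Bool :=
  ts.any (fun kv => PySem.Dict.getD pvLookup kv.1 "" == t)
def pvS (ts : List (String × Int)) (t : String) : Int :=
  ((ts.filter (fun kv => PySem.Dict.getD pvLookup kv.1 "" == t)).map (fun kv => kv.2)).sum

-- A's outer loop over any suffix of the theme table, in closed form at the items level
theorem pv_outer (ts : List (String × Int))
    (hsub : ∀ kv ∈ ts, kv.1 ∈ pvDataSetList)
    (hget : ∀ kv ∈ ts, PySem.Dict.getD (PySem.Dict.ofList ts) kv.1 0 = kv.2) :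
    ∀ (tds : List (String × PySem.Set String)), (∀ tm ∈ tds, tm ∈ pvThemeDict) →
      (tds.map Prod.fst).Nodup →
      ∀ (r : PySem.Dict String Int), (∀ tm ∈ tds, r.contains tm.1 = false) →
      (tds.foldl (fun result tm =>
        ts.foldl (fun result kv =>
          if PySem.Set.contains tm.2 kv.1 then
            PySem.Dict.modify result tm.1 0
              (· + PySem.Dict.getD (PySem.Dict.ofList ts) kv.1 0)
          else result) result) r).items
      = r.items ++ tds.filterMap (fun tm => if pvA ts tm.1 then some (tm.1, pvS ts tm.1) else none) := by
  intro tds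
  induction tds with
  | nil => intro _ _ r _; simp
  | cons tm rest ih =>
    intro hmem hndt r hr
    have hstep : ts.foldl (fun result kv =>
        if PySem.Set.contains tm.2 kv.1 then
          PySem.Dict.modify result tm.1 0
            (· + PySem.Dict.getD (PySem.Dict.ofList ts) kv.1 0)
        else result) r
        = if pvA ts tm.1 then r.modify tm.1 0 (· + pvS ts tm.1) else r := by
      rw [PySem.List.foldl_congr_mem _ _
        (fun result kv => if PySem.Dict.getD pvLookup kv.1 "" == tm.1 then
          PySem.Dict.modify result tm.1 0 (· + kv.2) else result) _
        (by intro acc kv hkv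
            rw [hget kv hkv, pv_getD_lookup kv.1 (hsub kv hkv) tm (hmem tm List.mem_cons_self)])]
      exact pv_inner_loop (fun kv => PySem.Dict.getD pvLookup kv.1 "" == tm.1) (fun kv => kv.2) tm.1 ts r
    have hfresh : r.contains tm.1 = false := hr tm List.mem_cons_self
    have hne : ∀ tm' ∈ rest, tm'.1 ≠ tm.1 := by
      intro tm' h' heq
      exact (List.nodup_cons.mp hndt).1 (heq ▸ List.mem_map_of_mem h')
    rw [List.foldl_cons, hstep]
    by_cases ha : pvA ts tm.1
    · rw [if_pos ha,
        ih (fun t h => hmem t (List.mem_cons_of_mem _ h)) (List.nodup_cons.mp hndt).2 _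
          (by intro tm' h'
              rw [PySem.Dict.contains_modify, hr tm' (List.mem_cons_of_mem _ h')]
              simp [beq_eq_false_iff_ne, hne tm' h']),
        pv_fresh_items r tm.1 (pvS ts tm.1) hfresh]
      simp [ha]
    · rw [if_neg ha, ih (fun t h => hmem t (List.mem_cons_of_mem _ h)) (List.nodup_cons.mp hndt).2 r
        (fun tm' h' => hr tm' (List.mem_cons_of_mem _ h'))]
      simp [ha]

-- ===== VERDICT (by name: the statement is the Claim_ definition above) =====
theorem check_theme_spec : Claim_equal_check_theme := by
  intro subjects _dom hnd
  unfold Pre_check_theme at hnd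
  unfold Spec_check_theme check_theme check_theme_alt
  have hfil : subjects.filter (fun kv => PySem.Set.contains pvDataSet kv.1)
      = subjects.filter (fun kv => PySem.Dict.contains pvLookup kv.1) :=
    List.filter_congr (fun kv _ => pv_contains_eq kv.1)
  simp only [hfil]
  set ts := subjects.filter (fun kv => PySem.Dict.contains pvLookup kv.1) with hts
  cases he : ts.isEmpty
  · -- non-empty: the two loops agree
    simp only [Bool.not_false, Bool.false_eq_true, if_true, if_false]
    have hsub : ∀ kv ∈ ts, kv.1 ∈ pvDataSetList := by
      intro kv hkv
      have h := (List.mem_filter.mp hkv).2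
      rw [PySem.Dict.contains_iff_mem_keys, pv_keys_lookup] at h
      exact h
    have hndk : (ts.map Prod.fst).Nodup :=
      hnd.sublist (List.Sublist.map Prod.fst List.filter_sublist)
    have hitems : (PySem.Dict.ofList ts).items = ts := by
      show (PySem.Dict.empty.update ts).items = ts
      show (ts.foldl (fun acc p => acc.insert p.1 p.2) PySem.Dict.empty).items = ts
      rw [PySem.Dict.items_foldl_insert_fresh ts Prod.fst Prod.snd PySem.Dict.empty
        (fun a _ => PySem.Dict.contains_empty a.1) hndk]
      simp [PySem.Dict.empty]
    have hget : ∀ kv ∈ ts, PySem.Dict.getD (PySem.Dict.ofList ts) kv.1 0 = kv.2 := by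
      intro kv hkv
      have hkn : (PySem.Dict.ofList ts).keys.Nodup := by
        show ((PySem.Dict.ofList ts).items.map Prod.fst).Nodup
        rw [hitems]; exact hndk
      exact PySem.Dict.getD_of_mem_items _ (by rw [hitems]; exact hkv) hkn 0
    have hA := pv_outer ts hsub hget pvThemeDict (fun tm h => h)
      (by decide) PySem.Dict.empty (fun tm _ => PySem.Dict.contains_empty tm.1)
    have hB : (pvThemeDict.map Prod.fst).filterMap (fun t =>
        if PySem.Dict.contains (ts.foldl (fun c kv =>
            PySem.Dict.insert c (PySem.Dict.getD pvLookup kv.1 "")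
              (PySem.Dict.getD c (PySem.Dict.getD pvLookup kv.1 "") 0 + kv.2)) PySem.Dict.empty) t
        then some (t, PySem.Dict.getD (ts.foldl (fun c kv =>
            PySem.Dict.insert c (PySem.Dict.getD pvLookup kv.1 "")
              (PySem.Dict.getD c (PySem.Dict.getD pvLookup kv.1 "") 0 + kv.2)) PySem.Dict.empty) t 0)
        else none)
        = pvThemeDict.filterMap (fun tm => if pvA ts tm.1 then some (tm.1, pvS ts tm.1) else none) := by
      rw [List.filterMap_map]
      apply List.filterMap_congr
      intro tm _
      rw [Function.comp_apply,
        pv_counts_contains (fun kv => PySem.Dict.getD pvLookup kv.1 "") (fun kv => kv.2) tm.1 ts,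
        pv_counts_getD (fun kv => PySem.Dict.getD pvLookup kv.1 "") (fun kv => kv.2) tm.1 ts]
      simp only [pvA, pvS, PySem.Dict.contains_empty, PySem.Dict.getD_empty, Bool.false_or, zero_add]
    simp only [Prod.mk.injEq, true_and, Option.some.injEq]
    rw [hA, ← hB]
    simp [PySem.Dict.empty]
  · simp
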